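-- pv_equiv track=rewrite | github.com/nchain-innovation/script_debugger | python/src/script_state.py | format_cmds
-- ===== SOURCE A (Python) =====
-- from typing import List, Union, Any
--
-- def format_cmds(script_str: str) -> str:
--     lines = script_str.split() # split by whitespaces
--     formatted_script: List = []
--     indent: int = 0
--     for op in lines:
--         if op in ["OP_IF", "OP_NOTIF"]:
--             formatted_script.append(' ' * indent + op)
--             indent += 2
--         elif op == "OP_ELSE":
--             # decrease before printing, OP_ELSE, increase afterwards
--             indent -= 2
--             formatted_script.append(' ' * indent + op)
--             indent += 2
--         elif op == "OP_ENDIF":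
--             # decreate indentation befre printing
--             indent -= 2
--             formatted_script.append(' ' * indent + op)
--         else:
--             # just print
--             formatted_script.append(' ' * indent + op)
--     return '\n'.join(formatted_script)
-- ===== SOURCE B (Python) =====
-- def _delta(op: str) -> int:
--     if op in ("OP_IF", "OP_NOTIF"):
--         return 2
--     if op == "OP_ENDIF":
--         return -2
--     return 0
--
--
-- def _offset(op: str) -> int:
--     return 2 if op in ("OP_ELSE", "OP_ENDIF") else 0
--
--
-- def format_cmds(script_str: str) -> str:
--     ops = script_str.split()
--     # pass 1: prefix-sum the per-token indent deltas -> indent *before* each token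
--     before = 0
--     befores = []
--     for op in ops:
--         befores.append(before)
--         before += _delta(op)
--     # pass 2: format each token at its indent (ELSE/ENDIF print 2 shallower)
--     return '\n'.join(' ' * (b - _offset(op)) + op for op, b in zip(ops, befores))
-- ===== Notes on version B (the rewrite author's own statement) =====
-- stated objective: alternative
-- what changed: Replaces A's single stateful loop that branches per opcode and appends formatted lines with a two-pass decomposition: a prefix-sum of per-token indent deltas, then a zip pass formatting each token at its precomputed indent.
import Mathlib
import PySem

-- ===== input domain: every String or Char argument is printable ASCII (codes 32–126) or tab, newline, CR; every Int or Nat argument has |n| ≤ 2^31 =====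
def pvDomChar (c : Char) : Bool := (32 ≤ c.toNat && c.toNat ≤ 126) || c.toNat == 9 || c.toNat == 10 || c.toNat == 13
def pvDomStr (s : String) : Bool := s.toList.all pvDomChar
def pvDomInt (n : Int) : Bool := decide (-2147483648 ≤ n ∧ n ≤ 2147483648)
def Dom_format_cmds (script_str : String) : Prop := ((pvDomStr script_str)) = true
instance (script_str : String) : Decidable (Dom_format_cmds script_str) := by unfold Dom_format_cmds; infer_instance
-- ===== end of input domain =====

-- B replaces A's single stateful loop with a prefix-sum of indent deltas plus a zip formatting pass (alternative decomposition, same cost).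

-- ===== PORT A =====
-- A's loop body: branch on the opcode, append the padded line, update the running indent.
def fcStepA (st : List (List Char) × Int) (op : List Char) : List (List Char) × Int :=
  if op = "OP_IF".toList ∨ op = "OP_NOTIF".toList then
    (st.1 ++ [List.replicate st.2.toNat ' ' ++ op], st.2 + 2)
  else if op = "OP_ELSE".toList then
    -- decrease before printing, increase afterwards
    (st.1 ++ [List.replicate (st.2 - 2).toNat ' ' ++ op], (st.2 - 2) + 2)
  else if op = "OP_ENDIF".toList then
    (st.1 ++ [List.replicate (st.2 - 2).toNat ' ' ++ op], st.2 - 2)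
  else
    (st.1 ++ [List.replicate st.2.toNat ' ' ++ op], st.2)

def format_cmds (script_str : String) : String :=
  let lines := PySem.Chars.split₀ script_str.toList
  let res := lines.foldl fcStepA ([], 0)
  String.mk (PySem.Chars.join "\n".toList res.1)

-- ===== PORT B =====
def deltaOf (op : List Char) : Int :=
  if op = "OP_IF".toList ∨ op = "OP_NOTIF".toList then 2
  else if op = "OP_ENDIF".toList then -2
  else 0

def offsetOf (op : List Char) : Int :=
  if op = "OP_ELSE".toList ∨ op = "OP_ENDIF".toList then 2 else 0

-- pass 1 of B: prefix-sum the deltas (accumulated befores list, running value)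
def fcStepB (st : List Int × Int) (op : List Char) : List Int × Int :=
  (st.1 ++ [st.2], st.2 + deltaOf op)

def format_cmds_alt (script_str : String) : String :=
  let ops := PySem.Chars.split₀ script_str.toList
  let befores := (ops.foldl fcStepB ([], 0)).1
  let lines := (ops.zip befores).map (fun p => List.replicate (p.2 - offsetOf p.1).toNat ' ' ++ p.1)
  String.mk (PySem.Chars.join "\n".toList lines)

-- ===== PRECONDITION & SPEC =====
def Spec_format_cmds (script_str : String) (out : String) : Prop := out = format_cmds_alt script_str
instance (script_str : String) (out : String) : Decidable (Spec_format_cmds script_str out) := by unfold Spec_format_cmds; infer_instance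

-- ===== CLAIM (what is proved, stated in full; the proofs are below) =====
def Claim_equal_format_cmds : Prop := ∀ (script_str : String), Dom_format_cmds script_str → Spec_format_cmds script_str (format_cmds script_str)

-- ===== LEMMAS AND PROOFS =====

-- reference formatting: each op printed at (indent before it) - offset, indent advanced by delta
def fcFmt : List (List Char) → Int → List (List Char)
  | [], _ => []
  | op :: rest, i =>
      (List.replicate (i - offsetOf op).toNat ' ' ++ op) :: fcFmt rest (i + deltaOf op)

-- the befores sequence produced by B's first pass, starting at i
def fcBefs : List (List Char) → Int → List Int
  | [], _ => []
  | op :: rest, i => i :: fcBefs rest (i + deltaOf op)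

lemma foldA_eq (ops : List (List Char)) : ∀ (acc : List (List Char)) (i : Int),
    (ops.foldl fcStepA (acc, i)).1 = acc ++ fcFmt ops i := by
  induction ops with
  | nil => intro acc i; simp [fcFmt]
  | cons op rest ih =>
    intro acc i
    simp only [List.foldl_cons]
    by_cases h1 : op = "OP_IF".toList ∨ op = "OP_NOTIF".toList
    · have hne : ¬ (op = "OP_ELSE".toList ∨ op = "OP_ENDIF".toList) := by
        rcases h1 with h | h <;> subst h <;> decide
      have hd : deltaOf op = 2 := by unfold deltaOf; rw [if_pos h1]
      have ho : offsetOf op = 0 := by unfold offsetOf; rw [if_neg hne]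
      rw [show fcStepA (acc, i) op = (acc ++ [List.replicate i.toNat ' ' ++ op], i + 2) from by
            unfold fcStepA; rw [if_pos h1], ih]
      simp [fcFmt, hd, ho]
    · by_cases h2 : op = "OP_ELSE".toList
      · subst h2
        rw [show fcStepA (acc, i) ("OP_ELSE".toList)
              = (acc ++ [List.replicate (i - 2).toNat ' ' ++ "OP_ELSE".toList], i - 2 + 2) from by
              unfold fcStepA; rw [if_neg h1, if_pos rfl], ih]
        have hi : i - 2 + 2 = i := by omega
        have hd : deltaOf ['O','P','_','E','L','S','E'] = 0 := by decide
        have ho : offsetOf ['O','P','_','E','L','S','E'] = 2 := by decide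
        rw [hi]
        simp [fcFmt, hd, ho]
      · by_cases h3 : op = "OP_ENDIF".toList
        · subst h3
          rw [show fcStepA (acc, i) ("OP_ENDIF".toList)
                = (acc ++ [List.replicate (i - 2).toNat ' ' ++ "OP_ENDIF".toList], i - 2) from by
                unfold fcStepA; rw [if_neg h1, if_neg (by decide), if_pos rfl], ih]
          have hd : deltaOf ['O','P','_','E','N','D','I','F'] = -2 := by decide
          have ho : offsetOf ['O','P','_','E','N','D','I','F'] = 2 := by decide
          simp [fcFmt, hd, ho, sub_eq_add_neg]
        · have hd : deltaOf op = 0 := by unfold deltaOf; rw [if_neg h1, if_neg h3]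
          have ho : offsetOf op = 0 := by unfold offsetOf; rw [if_neg (not_or.mpr ⟨h2, h3⟩)]
          rw [show fcStepA (acc, i) op = (acc ++ [List.replicate i.toNat ' ' ++ op], i) from by
                unfold fcStepA; rw [if_neg h1, if_neg h2, if_neg h3], ih]
          simp [fcFmt, hd, ho]

lemma foldB_eq (ops : List (List Char)) : ∀ (bs : List Int) (i : Int),
    (ops.foldl fcStepB (bs, i)).1 = bs ++ fcBefs ops i := by
  induction ops with
  | nil => intro bs i; simp [fcBefs]
  | cons op rest ih =>
    intro bs i
    simp [List.foldl_cons, fcStepB, fcBefs, ih]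

lemma zip_befs_eq (ops : List (List Char)) : ∀ (i : Int),
    (ops.zip (fcBefs ops i)).map (fun p => List.replicate (p.2 - offsetOf p.1).toNat ' ' ++ p.1)
      = fcFmt ops i := by
  induction ops with
  | nil => intro i; simp [fcBefs, fcFmt]
  | cons op rest ih =>
    intro i
    simp [fcBefs, fcFmt, List.zip_cons_cons, ih]

-- ===== VERDICT (by name: the statement is the Claim_ definition above) =====
theorem format_cmds_spec : Claim_equal_format_cmds := by
  intro s _
  unfold Spec_format_cmds format_cmds format_cmds_alt
  simp only [foldA_eq, foldB_eq, zip_befs_eq, List.nil_append]
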